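-- pv_equiv track=rewrite | github.com/alexisraelmtz/master-python101 | automate/nested_dic.py | StudentPlacement
-- ===== SOURCE A (Python) =====
-- def StudentPlacement(scores):
--     survey = ""
--     num_passed = 0
--     for student, grades in scores.items():
--         classResult = []
--         for classroom, score in grades.items():
--             result = grades.get(classroom)
--             classResult.append(result)
--             if score >= 5:
--                 num_passed += 1
--             for key, _ in grades.items():
--                 if len(classResult) == len(grades):
--                     survey += f"In {key} they graded: {classResult} and {num_passed} students passed.\n"
--
--     return survey
-- ===== SOURCE B (Python) =====
-- def StudentPlacement(scores):
--     parts = []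
--     num_passed = 0
--     for grades in scores.values():
--         vals = list(grades.values())
--         if vals:
--             num_passed += sum(1 for v in vals if v >= 5)
--             body = f" they graded: {vals} and {num_passed} students passed.\n"
--             for key in grades:
--                 parts.append(f"In {key}{body}")
--     return "".join(parts)
-- ===== Notes on version B (the rewrite author's own statement) =====
-- stated objective: faster
-- what changed: A re-scans every key of a student's grade dict once per grade (plus a redundant grades.get lookup per grade), emitting lines only when the collected list is full; B makes a single pass per student collecting the values and the cumulative pass count, builds the shared line body once, and emits the m per-key lines directly, joining parts at the end.
import Mathlib
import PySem

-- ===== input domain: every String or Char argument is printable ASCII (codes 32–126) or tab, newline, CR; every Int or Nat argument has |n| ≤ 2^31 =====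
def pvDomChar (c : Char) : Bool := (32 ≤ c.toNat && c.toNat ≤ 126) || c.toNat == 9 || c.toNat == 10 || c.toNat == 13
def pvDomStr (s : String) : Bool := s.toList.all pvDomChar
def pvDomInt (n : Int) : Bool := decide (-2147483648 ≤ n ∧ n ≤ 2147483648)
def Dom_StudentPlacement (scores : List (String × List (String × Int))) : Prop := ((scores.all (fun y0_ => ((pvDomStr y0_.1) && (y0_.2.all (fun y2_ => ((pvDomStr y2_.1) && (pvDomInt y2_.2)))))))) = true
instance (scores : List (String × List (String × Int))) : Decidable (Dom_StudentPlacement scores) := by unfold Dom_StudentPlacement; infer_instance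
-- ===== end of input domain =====

-- B replaces A's quadratic per-student key scan (the inner "for key" loop run once per grade)
-- by a single pass per student that collects the values and the cumulative pass count, then
-- emits the per-key lines once; objective: faster (asymptotic, O(n·m²) → O(n·m)).

-- Python's repr of a list of ints, e.g. "[5, 3]" (shared formatting helper of both ports)
def pyListRepr (l : List Int) : String := "[" ++ String.intercalate ", " (l.map PySem.Int.toStr) ++ "]"

-- ===== PORT A =====
-- one line of the f-string: f"In {key} they graded: {classResult} and {num_passed} students passed.\n"
def aLine (k : String) (cr : List Int) (np : Int) : String :=
  "In " ++ k ++ " they graded: " ++ pyListRepr cr ++ " and " ++ PySem.Int.toStr np ++ " students passed.\n"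

-- the innermost "for key, _ in grades.items()" loop
def aEmit (grades : List (String × Int)) (cr : List Int) (np : Int) (sv : String) : String :=
  grades.foldl (fun sv kv => if cr.length == grades.length then sv ++ aLine kv.1 cr np else sv) sv

-- one iteration of the middle "for classroom, score in grades.items()" loop;
-- state = (classResult, num_passed, survey); grades.get(classroom) always finds the key,
-- so the Optional value appended in Python is rendered by getD 0 (exact on Pre_: keys are unique)
def aStep (grades : List (String × Int)) (st : List Int × Int × String) (cs : String × Int) :
    List Int × Int × String :=
  let result := ((PySem.Dict.mk grades).get? cs.1).getD 0
  let classResult := st.1 ++ [result]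
  let np := if cs.2 ≥ 5 then st.2.1 + 1 else st.2.1
  (classResult, np, aEmit grades classResult np st.2.2)

def StudentPlacement (scores : List (String × List (String × Int))) : String :=
  (scores.foldl (fun (st : String × Int) sg =>
      let r := sg.2.foldl (aStep sg.2) ([], st.2, st.1)
      (r.2.2, r.2.1)) ("", 0)).1

-- ===== PORT B =====
-- one iteration of B's single outer loop; state = (parts, num_passed)
def bStep (st : List String × Int) (sg : String × List (String × Int)) : List String × Int :=
  let vals := sg.2.map Prod.snd
  if vals.isEmpty then st
  else
    let np := st.2 + ((vals.filter (fun v => decide (5 ≤ v))).length : Int)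
    let body := " they graded: " ++ pyListRepr vals ++ " and " ++ PySem.Int.toStr np ++
      " students passed.\n"
    (st.1 ++ sg.2.map (fun kv => "In " ++ kv.1 ++ body), np)

def StudentPlacement_alt (scores : List (String × List (String × Int))) : String :=
  String.join (scores.foldl bStep ([], 0)).1

-- ===== PRECONDITION & SPEC =====
-- Pre_ excludes association lists with duplicate keys (among the students or inside one
-- student's grades): such lists correspond to no Python dict, so A's behaviour there is
-- not defined by the source.
def Pre_StudentPlacement (scores : List (String × List (String × Int))) : Prop :=
  (scores.map Prod.fst).Nodup ∧ ∀ p ∈ scores, (p.2.map Prod.fst).Nodup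

instance (scores : List (String × List (String × Int))) : Decidable (Pre_StudentPlacement scores) := by
  unfold Pre_StudentPlacement; infer_instance

def pvWitness_StudentPlacement : (List (String × List (String × Int))) :=
  [("ana", [("math", 7), ("art", 3)]), ("bo", [("math", 5)])]

def Spec_StudentPlacement (scores : List (String × List (String × Int))) (out : String) : Prop := out = StudentPlacement_alt scores
instance (scores : List (String × List (String × Int))) (out : String) : Decidable (Spec_StudentPlacement scores out) := by unfold Spec_StudentPlacement; infer_instance

-- ===== CLAIM (what is proved, stated in full; the proofs are below) =====
def Claim_equal_StudentPlacement : Prop := ∀ (scores : List (String × List (String × Int))), Dom_StudentPlacement scores → Pre_StudentPlacement scores → Spec_StudentPlacement scores (StudentPlacement scores)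

-- ===== LEMMAS AND PROOFS =====

-- the pass count B adds per student, as an Int
def pc (l : List (String × Int)) : Int :=
  ((l.map Prod.snd).filter (fun v => decide (5 ≤ v))).length

lemma pc_nil : pc [] = 0 := rfl

lemma pc_cons (c : String × Int) (l : List (String × Int)) :
    pc (c :: l) = (if 5 ≤ c.2 then 1 else 0) + pc l := by
  by_cases h : 5 ≤ c.2 <;> simp [pc, h, add_comm]

lemma foldl_const {α β : Type} (l : List α) (s : β) :
    l.foldl (fun s _ => s) s = s := by
  induction l generalizing s with
  | nil => rfl
  | cons x xs ih => simpa using ih s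

lemma foldl_str_append (l : List String) (s : String) :
    l.foldl (· ++ ·) s = s ++ l.foldl (· ++ ·) "" := by
  induction l generalizing s with
  | nil => simp
  | cons x xs ih =>
    rw [List.foldl_cons, List.foldl_cons, ih (s ++ x), ih ("" ++ x)]
    simp [String.append_assoc]

lemma join_cons (x : String) (xs : List String) :
    String.join (x :: xs) = x ++ String.join xs := by
  unfold String.join
  rw [List.foldl_cons]
  simpa using foldl_str_append xs x

lemma foldl_append_join {α : Type} (l : List α) (f : α → String) (sv : String) :
    l.foldl (fun s x => s ++ f x) sv = sv ++ String.join (l.map f) := by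
  induction l generalizing sv with
  | nil => simp [String.join]
  | cons x xs ih =>
    rw [List.foldl_cons, ih, List.map_cons, join_cons, String.append_assoc]

lemma join_append (a b : List String) :
    String.join (a ++ b) = String.join a ++ String.join b := by
  induction a with
  | nil => simp [String.join]
  | cons x xs ih => rw [List.cons_append, join_cons, join_cons, ih, String.append_assoc]

lemma aEmit_false (grades : List (String × Int)) (cr : List Int) (np : Int) (sv : String)
    (h : cr.length ≠ grades.length) : aEmit grades cr np sv = sv := by
  unfold aEmit
  have hb : (cr.length == grades.length) = false := by simpa using h
  simp only [hb, Bool.false_eq_true, if_false]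
  exact foldl_const _ _

lemma aEmit_true (grades : List (String × Int)) (cr : List Int) (np : Int) (sv : String)
    (h : cr.length = grades.length) :
    aEmit grades cr np sv = sv ++ String.join (grades.map (fun kv => aLine kv.1 cr np)) := by
  unfold aEmit
  have hb : (cr.length == grades.length) = true := by simpa using h
  simp only [hb, if_true]
  exact foldl_append_join _ _ _

-- the middle loop over the remaining suffix l of grades
lemma mid (grades : List (String × Int)) (hnd : (grades.map Prod.fst).Nodup) :
    ∀ (l pre : List (String × Int)) (np : Int) (sv : String), grades = pre ++ l →
    l.foldl (aStep grades) (pre.map Prod.snd, np, sv) =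
      (grades.map Prod.snd, np + pc l,
       if l.isEmpty then sv
       else sv ++ String.join (grades.map (fun kv =>
         aLine kv.1 (grades.map Prod.snd) (np + pc l)))) := by
  intro l
  induction l with
  | nil =>
    intro pre np sv h
    simp [h, pc_nil]
  | cons c rest ih =>
    intro pre np sv h
    have hmem : c ∈ grades := by simp [h]
    have hget : (PySem.Dict.mk grades).get? c.1 = some c.2 := by
      apply PySem.Dict.get?_of_mem_items
      · simpa [PySem.Dict.items] using hmem
      · simpa [PySem.Dict.keys, PySem.Dict.items] using hnd
    have hstep : aStep grades (pre.map Prod.snd, np, sv) c =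
        ((pre ++ [c]).map Prod.snd, np + (if 5 ≤ c.2 then 1 else 0),
         aEmit grades ((pre ++ [c]).map Prod.snd) (np + (if 5 ≤ c.2 then 1 else 0)) sv) := by
      unfold aStep
      simp only [hget]
      by_cases h5 : 5 ≤ c.2 <;> simp [h5, ge_iff_le]
    rw [List.foldl_cons, hstep,
        ih (pre ++ [c]) (np + (if 5 ≤ c.2 then 1 else 0)) _ (by simp [h])]
    by_cases hr : rest = []
    · subst hr
      have hlen : ((pre ++ [c]).map Prod.snd).length = grades.length := by simp [h]
      rw [aEmit_true _ _ _ _ hlen]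
      have hpre : pre ++ [c] = grades := by simp [h]
      simp [hpre, pc_cons, pc_nil]
    · have hlen : ((pre ++ [c]).map Prod.snd).length ≠ grades.length := by
        have : 1 ≤ rest.length := by
          cases rest with
          | nil => exact absurd rfl hr
          | cons a b => simp
        simp [h]; omega
      rw [aEmit_false _ _ _ _ hlen]
      have : ¬ (rest.isEmpty = true) := by simpa using hr
      simp only [List.isEmpty_cons, this, if_false, Bool.false_eq_true, pc_cons, add_assoc]

-- bStep on a student with no grades / with grades, as closed equations
lemma bStep_empty (st : List String × Int) (sg : String × List (String × Int))
    (h : sg.2 = []) : bStep st sg = st := by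
  unfold bStep; simp [h]

lemma bStep_ne (st : List String × Int) (sg : String × List (String × Int))
    (h : sg.2 ≠ []) :
    bStep st sg = (st.1 ++ sg.2.map (fun kv => "In " ++ kv.1 ++
        (" they graded: " ++ pyListRepr (sg.2.map Prod.snd) ++ " and " ++
         PySem.Int.toStr (st.2 + pc sg.2) ++ " students passed.\n")), st.2 + pc sg.2) := by
  unfold bStep
  have he : ((sg.2.map Prod.snd).isEmpty = true) = False := by
    cases hsg : sg.2 with
    | nil => exact absurd hsg h
    | cons a b => simp
  simp only [he, if_false, pc]

-- B's fold: the parts accumulator only prefixes the result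
lemma bStep_parts (scores : List (String × List (String × Int))) :
    ∀ (parts : List String) (np : Int),
    scores.foldl bStep (parts, np) =
      (parts ++ (scores.foldl bStep ([], np)).1, (scores.foldl bStep ([], np)).2) := by
  induction scores with
  | nil => intro parts np; simp
  | cons sg rest ih =>
    intro parts np
    by_cases h : sg.2 = []
    · rw [List.foldl_cons, List.foldl_cons, bStep_empty (parts, np) sg h,
          bStep_empty ([], np) sg h]
      exact ih parts np
    · rw [List.foldl_cons, List.foldl_cons, bStep_ne (parts, np) sg h,
          bStep_ne ([], np) sg h]
      rw [ih (parts ++ _) _, ih ([] ++ _) _]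
      simp [List.append_assoc]

-- the two line formats agree (associativity of string append)
lemma line_eq (k : String) (vals : List Int) (np : Int) :
    aLine k vals np =
      "In " ++ k ++ (" they graded: " ++ pyListRepr vals ++ " and " ++ PySem.Int.toStr np ++
        " students passed.\n") := by
  simp [aLine, String.append_assoc]

lemma main (scores : List (String × List (String × Int)))
    (h : ∀ p ∈ scores, (p.2.map Prod.fst).Nodup) :
    ∀ (sv : String) (np : Int),
    scores.foldl (fun (st : String × Int) sg =>
        let r := sg.2.foldl (aStep sg.2) ([], st.2, st.1)
        (r.2.2, r.2.1)) (sv, np) =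
      (sv ++ String.join (scores.foldl bStep ([], np)).1,
       (scores.foldl bStep ([], np)).2) := by
  induction scores with
  | nil => intro sv np; simp [String.join]
  | cons sg rest ih =>
    intro sv np
    have hnd : (sg.2.map Prod.fst).Nodup := h sg (by simp)
    have hrest : ∀ p ∈ rest, (p.2.map Prod.fst).Nodup := fun p hp => h p (by simp [hp])
    have hm := mid sg.2 hnd sg.2 [] np sv rfl
    simp only [List.map_nil] at hm
    rw [List.foldl_cons]
    show List.foldl _ ((sg.2.foldl (aStep sg.2) ([], np, sv)).2.2,
        (sg.2.foldl (aStep sg.2) ([], np, sv)).2.1) rest = _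
    rw [hm]
    by_cases hg : sg.2 = []
    · have hemp : sg.2.isEmpty = true := by simp [hg]
      rw [List.foldl_cons, bStep_empty ([], np) sg hg]
      simp only [hemp, if_true]
      have : np + pc sg.2 = np := by simp [hg, pc_nil]
      rw [this]
      exact ih hrest sv np
    · have hemp : (sg.2.isEmpty = true) = False := by
        cases hsg : sg.2 with
        | nil => exact absurd hsg hg
        | cons a b => simp
      simp only [hemp, if_false]
      rw [List.foldl_cons, bStep_ne ([], np) sg hg]
      simp only [List.nil_append]
      rw [bStep_parts rest _ _, ih hrest _ _, join_append, String.append_assoc]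
      simp only [line_eq]

-- ===== VERDICT (by name: the statement is the Claim_ definition above) =====
theorem StudentPlacement_spec : Claim_equal_StudentPlacement := by
  intro scores _ hpre
  unfold Spec_StudentPlacement StudentPlacement StudentPlacement_alt
  rw [main scores hpre.2 "" 0]
  simp
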